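-- pv_equiv track=rewrite | github.com/jkweg/ASD | Exams, tests, etc./23-24/wired.py | wired
-- ===== SOURCE A (Python) =====
-- def wired(T):
--     """
--     T: lista długości m = 2n z parametrami mocy wejść
--     Zwraca minimalny koszt bezprzecinającego się perfect matchingu.
--     Złożoność: O(m^3), pamięć O(m^2).
--     """
--     m = len(T)
--     INF = 10**18
--     # dp[l][r] = minimalny koszt sparowania wszystkich punktów w [l..r]
--     # (zakładamy, że r-l+1 jest parzyste)
--     dp = [[0 if l > r else INF for r in range(m)] for l in range(m)]
--
--     # rozważamy kolejne długości przedziałów (2, 4, 6, …, m)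
--     for length in range(2, m+1, 2):
--         for l in range(0, m-length+1):
--             r = l + length - 1
--             best = INF
--             # parujemy l z k, gdzie (k-l) jest nieparzyste
--             for k in range(l+1, r+1, 2):
--                 cost_lk = 1 + abs(T[l] - T[k])
--                 left   = dp[l+1][k-1] if k-1 >= l+1 else 0
--                 right  = dp[k+1][r]   if k+1 <= r   else 0
--                 total  = left + right + cost_lk
--                 if total < best:
--                     best = total
--             dp[l][r] = best
--
--     return dp[0][m-1]
-- ===== SOURCE B (Python) =====
-- def wired(T):
--     """Top-down memoized interval recursion instead of A's bottom-up O(m^3) table;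
--     returns 0 for empty input where A raises IndexError."""
--     m = len(T)
--     INF = 10**18
--     memo = {}
--
--     def solve(l, r):
--         if l > r:
--             return 0
--         if (l, r) in memo:
--             return memo[(l, r)]
--         best = INF
--         for k in range(l + 1, r + 1, 2):
--             cand = solve(l + 1, k - 1) + solve(k + 1, r) + 1 + abs(T[l] - T[k])
--             if cand < best:
--                 best = cand
--         memo[(l, r)] = best
--         return best
--
--     return solve(0, m - 1)
-- ===== Notes on version B (the rewrite author's own statement) =====
-- stated objective: alternative
-- what changed: Replaced the bottom-up O(m^3) interval-DP table with top-down memoized recursion solve(l,r) over intervals, computing only reachable subproblems.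
-- crash fix: On the empty list A raises IndexError (dp[0][-1] on an empty table) while B's recursion returns 0. — e.g. on wired([]): A raises IndexError, B returns 0
import Mathlib
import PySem

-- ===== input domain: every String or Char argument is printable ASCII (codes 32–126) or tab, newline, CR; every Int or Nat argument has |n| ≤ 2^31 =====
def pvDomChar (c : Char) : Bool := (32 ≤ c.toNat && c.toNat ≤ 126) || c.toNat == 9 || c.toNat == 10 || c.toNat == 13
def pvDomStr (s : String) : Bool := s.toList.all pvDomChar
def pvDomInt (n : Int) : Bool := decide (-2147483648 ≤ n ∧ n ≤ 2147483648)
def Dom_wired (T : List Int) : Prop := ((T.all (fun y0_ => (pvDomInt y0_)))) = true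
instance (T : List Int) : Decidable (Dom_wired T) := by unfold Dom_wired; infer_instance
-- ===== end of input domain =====

-- B replaces A's bottom-up interval-DP table by top-down memoized recursion over the same
-- intervals (objective: alternative decomposition, same asymptotic cost).

def pvINF : Int := 10 ^ 18

-- ===== PORT A =====
-- literal transliteration of A: build the m×m table, then fill it length by length.
def wired (T : List Int) : Int :=
  let m : Int := T.length
  let dp0 : List (List Int) :=
    (PySem.List.pyRange 0 m 1).map (fun l =>
      (PySem.List.pyRange 0 m 1).map (fun r => if l > r then 0 else pvINF))
  let dp := (PySem.List.pyRange 2 (m + 1) 2).foldl (fun dp length =>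
    (PySem.List.pyRange 0 (m - length + 1) 1).foldl (fun dp l =>
      let r := l + length - 1
      let best := (PySem.List.pyRange (l + 1) (r + 1) 2).foldl (fun best k =>
        let cost_lk := 1 + |PySem.List.pyGetD T l 0 - PySem.List.pyGetD T k 0|
        let left := if k - 1 ≥ l + 1 then PySem.List.pyGetD (PySem.List.pyGetD dp (l + 1) []) (k - 1) 0 else 0
        let right := if k + 1 ≤ r then PySem.List.pyGetD (PySem.List.pyGetD dp (k + 1) []) r 0 else 0
        let total := left + right + cost_lk
        if total < best then total else best) pvINF
      dp.set l.toNat ((PySem.List.pyGetD dp l []).set r.toNat best)) dp) dp0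
  PySem.List.pyGetD (PySem.List.pyGetD dp 0 []) (m - 1) 0

-- ===== PORT B =====
-- transliteration of B's solve(l, r): the fuel argument only makes the recursion structural
-- (its 0-branch is never taken when fuel ≥ interval length); the memo dict is threaded through
-- exactly as in Source B.
def wiredSolve (T : List Int) : Nat → Int → Int → PySem.Dict (Int × Int) Int →
    Int × PySem.Dict (Int × Int) Int
  | fuel, l, r, memo =>
    if l > r then (0, memo)
    else
      match memo.get? (l, r) with
      | some v => (v, memo)
      | none =>
        match fuel with
        | 0 => (0, memo)
        | fuel' + 1 =>
          let p := (PySem.List.pyRange (l + 1) (r + 1) 2).foldl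
            (fun (acc : Int × PySem.Dict (Int × Int) Int) k =>
              let a := wiredSolve T fuel' (l + 1) (k - 1) acc.2
              let b := wiredSolve T fuel' (k + 1) r a.2
              let cand := a.1 + b.1 + 1 + |PySem.List.pyGetD T l 0 - PySem.List.pyGetD T k 0|
              (if cand < acc.1 then cand else acc.1, b.2)) (pvINF, memo)
          (p.1, p.2.insert (l, r) p.1)

def wired_alt (T : List Int) : Int :=
  (wiredSolve T T.length 0 ((T.length : Int) - 1) PySem.Dict.empty).1

-- ===== PRECONDITION & SPEC =====
-- Pre_ excludes only the empty list, on which A raises IndexError (dp[0][-1] on an empty table).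
def Pre_wired (T : List Int) : Prop := T ≠ []
instance (T : List Int) : Decidable (Pre_wired T) := by unfold Pre_wired; infer_instance
def pvWitness_wired : List Int := [3, 5]

-- On the empty list A raises IndexError while B's recursion returns 0.
def Raises_wired (T : List Int) : Prop := T = []
instance (T : List Int) : Decidable (Raises_wired T) := by unfold Raises_wired; infer_instance
def pvRaiseWitness_wired : List Int := []
def pvRaiseWitnessOut_wired : Int := 0

def Spec_wired (T : List Int) (out : Int) : Prop := out = wired_alt T
instance (T : List Int) (out : Int) : Decidable (Spec_wired T out) := by unfold Spec_wired; infer_instance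

-- ===== CLAIM (what is proved, stated in full; the proofs are below) =====
def Claim_equal_wired : Prop := ∀ (T : List Int), Dom_wired T → Pre_wired T → Spec_wired T (wired T)
def Claim_raises_wired : Prop := (∀ (T : List Int), Dom_wired T → Raises_wired T → ¬ Pre_wired T) ∧
  (Dom_wired (pvRaiseWitness_wired) ∧ Raises_wired (pvRaiseWitness_wired) ∧
    wired_alt (pvRaiseWitness_wired) = pvRaiseWitnessOut_wired)

-- ===== LEMMAS AND PROOFS =====
-- Both ports are proved to compute MM, the pure interval recurrence
-- (wiredRec with enough fuel): B by a memo-table invariant, A by a table invariant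
-- over its length-by-length fill.

def wiredRec (T : List Int) : Nat → Int → Int → Int
  | fuel, l, r =>
    if l > r then 0
    else
      match fuel with
      | 0 => 0
      | fuel' + 1 =>
        (PySem.List.pyRange (l + 1) (r + 1) 2).foldl (fun best k =>
          let cand := wiredRec T fuel' (l + 1) (k - 1) + wiredRec T fuel' (k + 1) r + 1 +
            |PySem.List.pyGetD T l 0 - PySem.List.pyGetD T k 0|
          if cand < best then cand else best) pvINF

def MM (T : List Int) (l r : Int) : Int := wiredRec T (r + 1 - l).toNat l r

lemma mem_ks {l r k : Int} (hk : k ∈ PySem.List.pyRange (l + 1) (r + 1) 2) :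
    l + 1 ≤ k ∧ k ≤ r ∧ (2 : Int) ∣ k - (l + 1) := by
  rcases (PySem.List.mem_pyRange_iff_of_pos (by omega) k).mp hk with ⟨h1, h2, h3⟩
  exact ⟨h1, by omega, h3⟩

lemma wiredRec_canon {T : List Int} : ∀ (f : Nat), ∀ (l r : Int),
    (r + 1 - l).toNat ≤ f → wiredRec T f l r = MM T l r := by
  intro f
  induction f using Nat.strong_induction_on with
  | _ f ih =>
    intro l r hf
    by_cases hlr : l > r
    · unfold MM wiredRec; simp [hlr]
    · have hn : ∃ n, (r + 1 - l).toNat = n + 1 := ⟨(r + 1 - l).toNat - 1, by omega⟩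
      obtain ⟨n, hn⟩ := hn
      obtain ⟨f', rfl⟩ : ∃ f', f = f' + 1 := ⟨f - 1, by omega⟩
      have key : ∀ g : Nat, g < f' + 1 → n ≤ g →
          wiredRec T (g + 1) l r = (PySem.List.pyRange (l + 1) (r + 1) 2).foldl (fun best k =>
            let cand := MM T (l + 1) (k - 1) + MM T (k + 1) r + 1 +
              |PySem.List.pyGetD T l 0 - PySem.List.pyGetD T k 0|
            if cand < best then cand else best) pvINF := by
        intro g hg hng
        conv_lhs => rw [wiredRec]
        simp only [if_neg hlr]
        apply PySem.List.foldl_congr_mem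
        intro acc k hk
        obtain ⟨hk1, hk2, _⟩ := mem_ks hk
        rw [ih g hg (l + 1) (k - 1) (by omega), ih g hg (k + 1) r (by omega)]
      have h1 := key f' (by omega) (by omega)
      have h2 := key n (by omega) (by omega)
      rw [MM, hn, h1, ← h2]

lemma MM_gt {T : List Int} {l r : Int} (h : l > r) : MM T l r = 0 := by
  unfold MM wiredRec; simp [h]

lemma MM_le' {T : List Int} {l r : Int} (h : ¬ l > r) :
    MM T l r = (PySem.List.pyRange (l + 1) (r + 1) 2).foldl (fun best k =>
      let cand := MM T (l + 1) (k - 1) + MM T (k + 1) r + 1 +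
        |PySem.List.pyGetD T l 0 - PySem.List.pyGetD T k 0|
      if cand < best then cand else best) pvINF := by
  have hn : ∃ n, (r + 1 - l).toNat = n + 1 := ⟨(r + 1 - l).toNat - 1, by omega⟩
  obtain ⟨n, hn⟩ := hn
  conv_lhs => rw [MM, hn, wiredRec]
  simp only [if_neg h]
  apply PySem.List.foldl_congr_mem
  intro acc k hk
  obtain ⟨hk1, hk2, _⟩ := mem_ks hk
  rw [wiredRec_canon n (l + 1) (k - 1) (by omega), wiredRec_canon n (k + 1) r (by omega)]

lemma foldl_min_lb {α : Type} (g : α → Int) (c : Int) :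
    ∀ (l : List α) (init : Int), c ≤ init → (∀ k ∈ l, c ≤ g k) →
    c ≤ l.foldl (fun b k => if g k < b then g k else b) init := by
  intro l
  induction l with
  | nil => intro init h _; exact h
  | cons x xs ih =>
    intro init h hall
    simp only [List.foldl_cons]
    refine ih _ ?_ (fun k hk => hall k (List.mem_cons_of_mem _ hk))
    by_cases hx : g x < init
    · simpa [hx] using hall x List.mem_cons_self
    · simpa [hx] using h

lemma foldl_min_stay {α : Type} (g : α → Int) :
    ∀ (l : List α) (init : Int), (∀ k ∈ l, ¬ g k < init) →
    l.foldl (fun b k => if g k < b then g k else b) init = init := by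
  intro l
  induction l with
  | nil => intro init _; rfl
  | cons x xs ih =>
    intro init hall
    simp only [List.foldl_cons, if_neg (hall x List.mem_cons_self)]
    exact ih init (fun k hk => hall k (List.mem_cons_of_mem _ hk))

lemma wiredRec_nonneg {T : List Int} : ∀ (fuel : Nat) (l r : Int), 0 ≤ wiredRec T fuel l r := by
  intro fuel
  induction fuel with
  | zero => intro l r; unfold wiredRec; split <;> simp
  | succ f ih =>
    intro l r
    rw [wiredRec]
    by_cases hlr : l > r
    · simp [hlr]
    · simp only [if_neg hlr]
      refine foldl_min_lb _ 0 _ pvINF (by norm_num [pvINF]) ?_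
      intro k _
      have h1 := ih (l + 1) (k - 1)
      have h2 := ih (k + 1) r
      have h3 : (0:Int) ≤ |PySem.List.pyGetD T l 0 - PySem.List.pyGetD T k 0| := abs_nonneg _
      omega

lemma MM_nonneg {T : List Int} (l r : Int) : 0 ≤ MM T l r := wiredRec_nonneg _ l r

lemma MM_odd {T : List Int} : ∀ (n : Nat) (l r : Int), (r + 1 - l).toNat ≤ n →
    l ≤ r → (2 : Int) ∣ r - l → MM T l r = pvINF := by
  intro n
  induction n using Nat.strong_induction_on with
  | _ n ih =>
    intro l r hn hlr hdvd
    rw [MM_le' (by omega)]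
    apply foldl_min_stay
    intro k hk
    obtain ⟨hk1, hk2, hk3⟩ := mem_ks hk
    -- r - k is odd, hence k < r, and [k+1, r] is again an odd interval
    have hkr : k + 1 ≤ r := by omega
    have hrec : MM T (k + 1) r = pvINF := by
      refine ih (r - k).toNat (by omega) (k + 1) r (by omega) (by omega) (by omega)
    have h1 := MM_nonneg (T := T) (l + 1) (k - 1)
    have h3 : (0:Int) ≤ |PySem.List.pyGetD T l 0 - PySem.List.pyGetD T k 0| := abs_nonneg _
    simp only [hrec]
    omega

lemma MM_odd' {T : List Int} {l r : Int} (hlr : l ≤ r) (h : (2 : Int) ∣ r - l) :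
    MM T l r = pvINF := MM_odd (r + 1 - l).toNat l r le_rfl hlr h

def GoodMemo (T : List Int) (memo : PySem.Dict (Int × Int) Int) : Prop :=
  ∀ (l r : Int) (v : Int), memo.get? (l, r) = some v → v = MM T l r

lemma wiredSolve_correct {T : List Int} : ∀ (fuel : Nat) (l r : Int)
    (memo : PySem.Dict (Int × Int) Int), (r + 1 - l).toNat ≤ fuel → GoodMemo T memo →
    (wiredSolve T fuel l r memo).1 = MM T l r ∧ GoodMemo T (wiredSolve T fuel l r memo).2 := by
  intro fuel
  induction fuel with
  | zero =>
    intro l r memo hf hg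
    have hlr : l > r := by omega
    rw [wiredSolve]
    simp only [if_pos hlr]
    exact ⟨(MM_gt hlr).symm, hg⟩
  | succ f ih =>
    intro l r memo hf hg
    rw [wiredSolve]
    by_cases hlr : l > r
    · simp only [if_pos hlr]
      exact ⟨(MM_gt hlr).symm, hg⟩
    · simp only [if_neg hlr]
      cases hmem : PySem.Dict.get? memo (l, r) with
      | some v => exact ⟨hg l r v hmem, hg⟩
      | none =>
        simp only
        have inner : ∀ (ks : List Int), (∀ k ∈ ks, l + 1 ≤ k ∧ k ≤ r) →
            ∀ (best : Int) (memo' : PySem.Dict (Int × Int) Int), GoodMemo T memo' →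
            (ks.foldl (fun (acc : Int × PySem.Dict (Int × Int) Int) k =>
              let a := wiredSolve T f (l + 1) (k - 1) acc.2
              let b := wiredSolve T f (k + 1) r a.2
              let cand := a.1 + b.1 + 1 + |PySem.List.pyGetD T l 0 - PySem.List.pyGetD T k 0|
              (if cand < acc.1 then cand else acc.1, b.2)) (best, memo')).1 =
            ks.foldl (fun best k =>
              let cand := MM T (l + 1) (k - 1) + MM T (k + 1) r + 1 +
                |PySem.List.pyGetD T l 0 - PySem.List.pyGetD T k 0|
              if cand < best then cand else best) best ∧
            GoodMemo T (ks.foldl (fun (acc : Int × PySem.Dict (Int × Int) Int) k =>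
              let a := wiredSolve T f (l + 1) (k - 1) acc.2
              let b := wiredSolve T f (k + 1) r a.2
              let cand := a.1 + b.1 + 1 + |PySem.List.pyGetD T l 0 - PySem.List.pyGetD T k 0|
              (if cand < acc.1 then cand else acc.1, b.2)) (best, memo')).2 := by
          intro ks
          induction ks with
          | nil => intro _ best memo' hg'; exact ⟨rfl, hg'⟩
          | cons k ks ihk =>
            intro hks best memo' hg'
            obtain ⟨hk1, hk2⟩ := hks k List.mem_cons_self
            have ha := ih (l + 1) (k - 1) memo' (by omega) hg'
            have hb := ih (k + 1) r (wiredSolve T f (l + 1) (k - 1) memo').2 (by omega) ha.2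
            simp only [List.foldl_cons, ha.1, hb.1]
            exact ihk (fun k hk => hks k (List.mem_cons_of_mem _ hk)) _ _ hb.2
        have hks : ∀ k ∈ PySem.List.pyRange (l + 1) (r + 1) 2, l + 1 ≤ k ∧ k ≤ r :=
          fun k hk => ⟨(mem_ks hk).1, (mem_ks hk).2.1⟩
        obtain ⟨h1, h2⟩ := inner _ hks pvINF memo hg
        constructor
        · simp only [h1, ← MM_le' hlr]
        · intro l' r' v hv
          rw [PySem.Dict.get?_insert] at hv
          by_cases he : (l', r') = (l, r)
          · rw [if_pos he] at hv
            obtain ⟨hl, hr⟩ := Prod.mk.injEq .. ▸ he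
            cases hv
            simp only [hl, hr] at *
            simp only [h1, ← MM_le' hlr]
          · rw [if_neg he] at hv
            exact h2 l' r' v hv

def DD (dp : List (List Int)) (l r : Int) : Int :=
  PySem.List.pyGetD (PySem.List.pyGetD dp l []) r 0

def dpInit (T : List Int) : List (List Int) :=
  (PySem.List.pyRange 0 (T.length : Int) 1).map (fun l =>
    (PySem.List.pyRange 0 (T.length : Int) 1).map (fun r => if l > r then 0 else pvINF))

def stepK (T : List Int) (dp : List (List Int)) (l r : Int) (best k : Int) : Int :=
  let cost_lk := 1 + |PySem.List.pyGetD T l 0 - PySem.List.pyGetD T k 0|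
  let left := if k - 1 ≥ l + 1 then DD dp (l + 1) (k - 1) else 0
  let right := if k + 1 ≤ r then DD dp (k + 1) r else 0
  let total := left + right + cost_lk
  if total < best then total else best

def stepL (T : List Int) (length : Int) (dp : List (List Int)) (l : Int) : List (List Int) :=
  let r := l + length - 1
  let best := (PySem.List.pyRange (l + 1) (r + 1) 2).foldl (stepK T dp l r) pvINF
  dp.set l.toNat ((PySem.List.pyGetD dp l []).set r.toNat best)

def stepLen (T : List Int) (dp : List (List Int)) (length : Int) : List (List Int) :=
  (PySem.List.pyRange 0 ((T.length : Int) - length + 1) 1).foldl (stepL T length) dp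

lemma wired_unfold (T : List Int) : wired T =
    PySem.List.pyGetD (PySem.List.pyGetD
      ((PySem.List.pyRange 2 ((T.length : Int) + 1) 2).foldl (stepLen T) (dpInit T)) 0 [])
      ((T.length : Int) - 1) 0 := rfl

def Shape (m : Nat) (dp : List (List Int)) : Prop :=
  dp.length = m ∧ ∀ i : Nat, i < m → (dp.getD i []).length = m

lemma pyRange_two_cons {a b : Int} (h : a < b) :
    PySem.List.pyRange a b 2 = a :: PySem.List.pyRange (a + 2) b 2 := by
  rw [PySem.List.pyRange_of_pos a b (by norm_num), PySem.List.pyRange_of_pos (a + 2) b (by norm_num)]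
  rw [if_pos h]
  have hn : ((b - a + 2 - 1) / 2).toNat =
      (if a + 2 < b then ((b - (a + 2) + 2 - 1) / 2).toNat else 0) + 1 := by
    split <;> omega
  rw [hn, List.range_succ_eq_map]
  simp only [List.map_cons, List.map_map, Nat.cast_zero, mul_zero, add_zero]
  congr 1
  refine List.map_congr_left ?_
  intro k _
  simp only [Function.comp_apply, Nat.cast_succ]
  ring

lemma pyRange_two_nil {a b : Int} (h : b ≤ a) : PySem.List.pyRange a b 2 = [] := by
  rw [PySem.List.pyRange_of_pos a b (by norm_num), if_neg (by omega)]
  rfl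

lemma DD_getD (dp : List (List Int)) {l r : Int} (h0 : 0 ≤ l) (h2 : 0 ≤ r) :
    DD dp l r = (dp.getD l.toNat []).getD r.toNat 0 := by
  rw [DD, PySem.List.pyGetD_of_nonneg _ _ h0, PySem.List.pyGetD_of_nonneg _ _ h2]

lemma dpInit_shape (T : List Int) : Shape T.length (dpInit T) := by
  constructor
  · simp [dpInit, PySem.List.pyRange_zero_nat]
  · intro i hi
    simp [dpInit, PySem.List.pyRange_zero_nat, List.getD_eq_getElem?_getD, hi]

lemma dpInit_val (T : List Int) {l r : Int} (h0 : 0 ≤ l) (h1 : l < (T.length : Int))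
    (h2 : 0 ≤ r) (h3 : r < (T.length : Int)) :
    DD (dpInit T) l r = if l > r then 0 else pvINF := by
  rw [DD_getD _ h0 h2]
  have hl : l.toNat < T.length := by omega
  have hr : r.toNat < T.length := by omega
  have hln : ((l.toNat : Int)) = l := by omega
  have hrn : ((r.toNat : Int)) = r := by omega
  simp only [dpInit, PySem.List.pyRange_zero_nat, List.map_map, List.getD_eq_getElem?_getD,
    List.getElem?_map, List.getElem?_range, hl]
  simp only [Option.map_some, Option.getD_some, Function.comp_apply]
  simp only [List.getElem?_map, List.getElem?_range, hr, Option.map_some, Option.getD_some,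
    Function.comp_apply, hln, hrn]

lemma getD_set_self (dp : List (List Int)) (a : Nat) (row : List Int) (ha : a < dp.length) :
    (dp.set a row).getD a [] = row := by
  rw [List.getD_eq_getElem?_getD, List.getElem?_set, if_pos rfl, if_pos ha, Option.getD_some]

lemma getD_set_ne (dp : List (List Int)) (a i : Nat) (row : List Int) (h : a ≠ i) :
    (dp.set a row).getD i [] = dp.getD i [] := by
  rw [List.getD_eq_getElem?_getD, List.getElem?_set, if_neg h, ← List.getD_eq_getElem?_getD]

lemma getD_set_self' (row : List Int) (b : Nat) (v : Int) (hb : b < row.length) :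
    (row.set b v).getD b 0 = v := by
  rw [List.getD_eq_getElem?_getD, List.getElem?_set, if_pos rfl, if_pos hb, Option.getD_some]

lemma getD_set_ne' (row : List Int) (b j : Nat) (v : Int) (h : b ≠ j) :
    (row.set b v).getD j 0 = row.getD j 0 := by
  rw [List.getD_eq_getElem?_getD, List.getElem?_set, if_neg h, ← List.getD_eq_getElem?_getD]

lemma shape_set (m : Nat) (dp : List (List Int)) (hsh : Shape m dp) (a b : Nat) (ha : a < m)
    (v : Int) : Shape m (dp.set a ((dp.getD a []).set b v)) := by
  obtain ⟨hlen, hrow⟩ := hsh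
  refine ⟨by simp [hlen], ?_⟩
  intro i hi
  by_cases hia : a = i
  · subst hia
    rw [getD_set_self dp a _ (by omega), List.length_set]
    exact hrow a hi
  · rw [getD_set_ne dp a i _ hia]
    exact hrow i hi

lemma DD_set (m : Nat) (dp : List (List Int)) (hsh : Shape m dp) {a b : Nat}
    (ha : a < m) (hb : b < m) (v : Int) {l r : Int} (h0 : 0 ≤ l) (h2 : 0 ≤ r) :
    DD (dp.set a ((dp.getD a []).set b v)) l r =
      if l.toNat = a ∧ r.toNat = b then v else DD dp l r := by
  obtain ⟨hlen, hrow⟩ := hsh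
  rw [DD_getD _ h0 h2, DD_getD _ h0 h2]
  by_cases hla : l.toNat = a
  · subst hla
    rw [getD_set_self dp l.toNat _ (by omega)]
    by_cases hrb : r.toNat = b
    · subst hrb
      rw [if_pos ⟨rfl, rfl⟩]
      exact getD_set_self' _ r.toNat v (by rw [hrow l.toNat ha]; omega)
    · rw [if_neg (by tauto), getD_set_ne' _ b r.toNat v (fun h => hrb h.symm)]
  · rw [getD_set_ne dp a l.toNat _ (by omega), if_neg (by tauto)]

def InvI (T : List Int) (L j : Int) (dp : List (List Int)) : Prop :=
  Shape T.length dp ∧ ∀ l r : Int, 0 ≤ l → l < (T.length : Int) → 0 ≤ r → r < (T.length : Int) →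
    DD dp l r = if l > r then 0
      else if r + 1 - l ≤ L - 2 ∨ (r + 1 - l = L ∧ l < j) then MM T l r else pvINF

lemma innerStep (T : List Int) {L j : Int} (hL2 : 2 ≤ L)
    (hLm : L ≤ (T.length : Int)) (hj0 : 0 ≤ j) (hjm : j ≤ (T.length : Int) - L)
    {dp : List (List Int)} (hinv : InvI T L j dp) : InvI T L (j + 1) (stepL T L dp j) := by
  obtain ⟨hsh, hval⟩ := hinv
  have hm2 : (2:Int) ≤ T.length := by omega
  have hbest : (PySem.List.pyRange (j + 1) (j + L - 1 + 1) 2).foldl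
      (stepK T dp j (j + L - 1)) pvINF = MM T j (j + L - 1) := by
    rw [MM_le' (by omega)]
    apply PySem.List.foldl_congr_mem
    intro acc k hk
    obtain ⟨hk1, hk2, hk3⟩ := mem_ks hk
    unfold stepK
    have hleft : (if k - 1 ≥ j + 1 then DD dp (j + 1) (k - 1) else 0) = MM T (j + 1) (k - 1) := by
      by_cases h : k - 1 ≥ j + 1
      · rw [if_pos h, hval (j + 1) (k - 1) (by omega) (by omega) (by omega) (by omega),
          if_neg (by omega), if_pos (Or.inl (by omega))]
      · rw [if_neg h]
        exact (MM_gt (by omega)).symm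
    have hright : (if k + 1 ≤ j + L - 1 then DD dp (k + 1) (j + L - 1) else 0) =
        MM T (k + 1) (j + L - 1) := by
      by_cases h : k + 1 ≤ j + L - 1
      · rw [if_pos h, hval (k + 1) (j + L - 1) (by omega) (by omega) (by omega) (by omega),
          if_neg (by omega), if_pos (Or.inl (by omega))]
      · rw [if_neg h]
        exact (MM_gt (by omega)).symm
    simp only [hleft, hright]
    ring_nf
  constructor
  · rw [stepL, PySem.List.pyGetD_of_nonneg _ _ hj0]
    exact shape_set T.length dp hsh j.toNat _ (by omega) _
  · intro l' r' g0 g1 g2 g3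
    rw [stepL, PySem.List.pyGetD_of_nonneg _ _ hj0, hbest,
      DD_set T.length dp hsh (by omega) (by omega) _ g0 g2]
    by_cases hc : l' = j ∧ r' = j + L - 1
    · obtain ⟨rfl, rfl⟩ := hc
      rw [if_pos ⟨rfl, rfl⟩, if_neg (by omega), if_pos (Or.inr ⟨by omega, by omega⟩)]
    · rw [if_neg (by omega), hval l' r' g0 g1 g2 g3]
      by_cases hlr : l' > r'
      · simp [hlr]
      · rw [if_neg hlr, if_neg hlr]
        by_cases hcond : r' + 1 - l' ≤ L - 2 ∨ (r' + 1 - l' = L ∧ l' < j)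
        · rw [if_pos hcond, if_pos (by omega)]
        · rw [if_neg hcond, if_neg (by omega)]

lemma InvI_shift (T : List Int) {L j j' : Int} (hj : (T.length : Int) - L < j)
    (hj' : (T.length : Int) - L < j') {dp : List (List Int)} (hinv : InvI T L j dp) :
    InvI T L j' dp := by
  obtain ⟨hsh, hval⟩ := hinv
  refine ⟨hsh, ?_⟩
  intro l r g0 g1 g2 g3
  rw [hval l r g0 g1 g2 g3]
  by_cases hlr : l > r
  · simp [hlr]
  · rw [if_neg hlr, if_neg hlr]
    by_cases hcond : r + 1 - l ≤ L - 2 ∨ (r + 1 - l = L ∧ l < j)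
    · rw [if_pos hcond, if_pos (by omega)]
    · rw [if_neg hcond, if_neg (by omega)]

lemma innerLoop (T : List Int) {L : Int} (hL2 : 2 ≤ L) (hLm : L ≤ (T.length : Int)) :
    ∀ (n : Nat) (j : Int) (dp : List (List Int)), 0 ≤ j →
    ((T.length : Int) - L + 1 - j).toNat ≤ n → InvI T L j dp →
    InvI T L ((T.length : Int) - L + 1)
      ((PySem.List.pyRange j ((T.length : Int) - L + 1) 1).foldl (stepL T L) dp) := by
  intro n
  induction n with
  | zero =>
    intro j dp hj0 hn hinv
    rw [PySem.List.pyRange_one_eq_nil (by omega), List.foldl_nil]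
    exact InvI_shift T (j := j) (by omega) (by omega) hinv
  | succ n ih =>
    intro j dp hj0 hn hinv
    by_cases hend : (T.length : Int) - L + 1 ≤ j
    · rw [PySem.List.pyRange_one_eq_nil (by omega), List.foldl_nil]
      exact InvI_shift T (j := j) (by omega) (by omega) hinv
    · rw [PySem.List.pyRange_one_cons (by omega), List.foldl_cons]
      exact ih (j + 1) _ (by omega) (by omega)
        (innerStep T hL2 hLm hj0 (by omega) hinv)

def InvL (T : List Int) (L : Int) (dp : List (List Int)) : Prop :=
  Shape T.length dp ∧ ∀ l r : Int, 0 ≤ l → l < (T.length : Int) → 0 ≤ r → r < (T.length : Int) →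
    DD dp l r = if l > r then 0 else if r + 1 - l ≤ L then MM T l r else pvINF

lemma InvL_to_InvI (T : List Int) {L : Int} {dp : List (List Int)} (hinv : InvL T (L - 2) dp) :
    InvI T L 0 dp := by
  obtain ⟨hsh, hval⟩ := hinv
  refine ⟨hsh, ?_⟩
  intro l r g0 g1 g2 g3
  rw [hval l r g0 g1 g2 g3]
  by_cases hlr : l > r
  · simp [hlr]
  · rw [if_neg hlr, if_neg hlr]
    by_cases hcond : r + 1 - l ≤ L - 2
    · rw [if_pos hcond, if_pos (Or.inl hcond)]
    · rw [if_neg hcond, if_neg (by omega)]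

lemma InvI_to_InvL (T : List Int) {L : Int} (hLd : (2:Int) ∣ L)
    {dp : List (List Int)} (hinv : InvI T L ((T.length : Int) - L + 1) dp) : InvL T L dp := by
  obtain ⟨hsh, hval⟩ := hinv
  refine ⟨hsh, ?_⟩
  intro l r g0 g1 g2 g3
  rw [hval l r g0 g1 g2 g3]
  split_ifs with h1 h2 h3 h4
  · rfl
  · rfl
  · omega
  · exact (MM_odd' (by omega) (by omega)).symm
  · rfl

lemma outerLoop (T : List Int) : ∀ (n : Nat) (L : Int) (dp : List (List Int)),
    2 ≤ L → (2:Int) ∣ L → ((T.length : Int) + 1 - L).toNat ≤ n → InvL T (L - 2) dp →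
    InvL T (T.length : Int)
      ((PySem.List.pyRange L ((T.length : Int) + 1) 2).foldl (stepLen T) dp) := by
  intro n
  induction n with
  | zero =>
    intro L dp hL2 hLd hn hinv
    rw [pyRange_two_nil (by omega), List.foldl_nil]
    obtain ⟨hsh, hval⟩ := hinv
    refine ⟨hsh, ?_⟩
    intro l r g0 g1 g2 g3
    rw [hval l r g0 g1 g2 g3]
    split_ifs with h1 h2 h3 h4
    · rfl
    · rfl
    · omega
    · exact (MM_odd' (by omega) (by omega)).symm
    · omega
  | succ n ih =>
    intro L dp hL2 hLd hn hinv
    by_cases hend : (T.length : Int) + 1 ≤ L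
    · rw [pyRange_two_nil (by omega), List.foldl_nil]
      obtain ⟨hsh, hval⟩ := hinv
      refine ⟨hsh, ?_⟩
      intro l r g0 g1 g2 g3
      rw [hval l r g0 g1 g2 g3]
      split_ifs with h1 h2 h3 h4
      · rfl
      · rfl
      · omega
      · exact (MM_odd' (by omega) (by omega)).symm
      · omega
    · rw [pyRange_two_cons (by omega), List.foldl_cons]
      have hstep : InvL T L (stepLen T dp L) :=
        InvI_to_InvL T hLd
          (innerLoop T hL2 (by omega) ((T.length : Int) - L + 1).toNat 0 dp (by omega)
            (by omega) (InvL_to_InvI T hinv))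
      exact ih (L + 2) (stepLen T dp L) (by omega) (by omega) (by omega)
        (by rw [show L + 2 - 2 = L by ring]; exact hstep)

lemma dpInit_InvL (T : List Int) : InvL T 0 (dpInit T) := by
  refine ⟨dpInit_shape T, ?_⟩
  intro l r g0 g1 g2 g3
  rw [dpInit_val T g0 g1 g2 g3]
  by_cases hlr : l > r
  · simp [hlr]
  · rw [if_neg hlr, if_neg hlr, if_neg (by omega)]

lemma wired_eq (T : List Int) (h : T ≠ []) : wired T = MM T 0 ((T.length : Int) - 1) := by
  have hm : 0 < T.length := List.length_pos_of_ne_nil h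
  have hfin : InvL T (T.length : Int)
      ((PySem.List.pyRange 2 ((T.length : Int) + 1) 2).foldl (stepLen T) (dpInit T)) :=
    outerLoop T ((T.length : Int) + 1 - 2).toNat 2 (dpInit T) (by omega) (by omega)
      (by omega) (by simpa using dpInit_InvL T)
  obtain ⟨hsh, hval⟩ := hfin
  rw [wired_unfold]
  have := hval 0 ((T.length : Int) - 1) (by omega) (by omega) (by omega) (by omega)
  rw [DD] at this
  rw [this, if_neg (by omega), if_pos (by omega)]

lemma wired_alt_eq (T : List Int) : wired_alt T = MM T 0 ((T.length : Int) - 1) := by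
  have h := (wiredSolve_correct (T := T) T.length 0 ((T.length : Int) - 1) PySem.Dict.empty
    (by omega) (by intro l r v hv; simp [PySem.Dict.get?_empty] at hv)).1
  simpa [wired_alt] using h

-- ===== VERDICT (by name: the statement is the Claim_ definition above) =====
theorem wired_spec : Claim_equal_wired := by
  intro T _ hpre
  unfold Spec_wired
  rw [wired_eq T hpre, wired_alt_eq]

theorem wired_raises : Claim_raises_wired := by
  unfold Claim_raises_wired
  exact ⟨fun T _ hr hp => hp hr, by decide⟩

-- self-check: the raise-witness value stated in pvRaiseWitnessOut_wired is B's value there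
theorem pvRaiseWitnessOut_ok : wired_alt pvRaiseWitness_wired = pvRaiseWitnessOut_wired :=
  wired_raises.2.2.2
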